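-- pv_equiv track=rewrite | github.com/Krids/semeso23 | src/features/block_transactions_count_strategy.py | execute
-- ===== SOURCE A (Python) =====
-- from collections import defaultdict
-- from typing import Dict, List
--
-- def execute(data: List[Dict]) -> List[Dict]:
--     output_data = []
--     block_counts = defaultdict(int)
--     for transaction in data:
--         block_counts[transaction['blockNumber']] += 1
--
--     for transaction in data:
--         transaction_copy = transaction.copy()
--         transaction_copy['num_transactions'] = block_counts[transaction['blockNumber']]
--         output_data.append(transaction_copy)
--
--     return output_data
-- ===== SOURCE B (Python) =====
-- def execute(data):
--     groups = {}
--     for i, transaction in enumerate(data):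
--         groups.setdefault(transaction['blockNumber'], []).append(i)
--     output = [None] * len(data)
--     for indices in groups.values():
--         count = len(indices)
--         for i in indices:
--             row = dict(data[i])
--             row['num_transactions'] = count
--             output[i] = row
--     return output
-- ===== Notes on version B (the rewrite author's own statement) =====
-- stated objective: alternative
-- what changed: B groups transaction indices per blockNumber into lists (one enumerate pass), preallocates the output, and writes each annotated row back by its original position with the group's length as the count, instead of A's scalar counter dict plus a second append pass.
import Mathlib
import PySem

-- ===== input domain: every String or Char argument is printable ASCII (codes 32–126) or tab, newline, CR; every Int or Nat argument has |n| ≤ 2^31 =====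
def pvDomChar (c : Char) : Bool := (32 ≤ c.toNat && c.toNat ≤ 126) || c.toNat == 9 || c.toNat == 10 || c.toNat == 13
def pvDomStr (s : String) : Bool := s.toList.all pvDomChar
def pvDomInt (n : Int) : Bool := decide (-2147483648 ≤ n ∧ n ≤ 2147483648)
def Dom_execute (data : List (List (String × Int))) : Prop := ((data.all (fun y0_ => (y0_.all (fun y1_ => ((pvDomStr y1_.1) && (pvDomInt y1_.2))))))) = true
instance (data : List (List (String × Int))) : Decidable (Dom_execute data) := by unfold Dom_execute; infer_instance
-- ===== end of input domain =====

-- B replaces A's scalar counter dict + second append pass by per-block lists of indices (one enumerate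
-- pass) written back into a preallocated output by original position; same O(n) cost, different decomposition.

-- transaction['blockNumber'] (total form; Pre_execute guarantees the key is present — Python raises KeyError otherwise)
def pvBn (t : List (String × Int)) : Int := (PySem.Dict.mk t).getD "blockNumber" 0

-- ===== PORT A =====
def execute (data : List (List (String × Int))) : List (List (String × Int)) :=
  -- block_counts = defaultdict(int); for transaction in data: block_counts[transaction['blockNumber']] += 1
  let counts : PySem.Dict Int Int :=
    data.foldl (fun d t => d.modify (pvBn t) 0 (fun x => x + 1)) PySem.Dict.empty
  -- for transaction in data: append transaction.copy() with ['num_transactions'] = block_counts[...]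
  data.foldl (fun out t =>
    out ++ [((PySem.Dict.mk t).insert "num_transactions" (counts.getD (pvBn t) 0)).items]) []

-- ===== PORT B =====
-- groups = {}; for i, transaction in enumerate(data): groups.setdefault(transaction['blockNumber'], []).append(i)
-- (setdefault-then-append-in-place ≡ Dict.modify with default [])
def pvGroupsB (data : List (List (String × Int))) : PySem.Dict Int (List Int) :=
  (PySem.List.enumerate data).foldl
    (fun g p => g.modify (pvBn p.2) [] (fun xs => xs ++ [p.1])) PySem.Dict.empty

def execute_alt (data : List (List (String × Int))) : List (List (String × Int)) :=
  let groups := pvGroupsB data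
  -- output = [None] * len(data)  (placeholder []; every position is overwritten)
  let out0 : List (List (String × Int)) := List.replicate data.length []
  -- for indices in groups.values(): count = len(indices); for i in indices: output[i] = dict(data[i]) + annotation
  groups.values.foldl (fun out idxs =>
    idxs.foldl (fun out i =>
      PySem.List.pySetD out i
        (((PySem.Dict.mk (PySem.List.pyGetD data i [])).insert "num_transactions"
            ((idxs.length : Int))).items)) out) out0

-- ===== PRECONDITION & SPEC =====
-- Pre_ excludes exactly the inputs where some transaction lacks the key 'blockNumber': there Python A raises KeyError.
def Pre_execute (data : List (List (String × Int))) : Prop :=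
  ∀ t ∈ data, (PySem.Dict.mk t).contains "blockNumber" = true
instance (data : List (List (String × Int))) : Decidable (Pre_execute data) := by unfold Pre_execute; infer_instance
def pvWitness_execute : (List (List (String × Int))) := [[("blockNumber", 3), ("value", 10)], [("blockNumber", 3)]]

def Spec_execute (data : List (List (String × Int))) (out : List (List (String × Int))) : Prop := out = execute_alt data
instance (data : List (List (String × Int))) (out : List (List (String × Int))) : Decidable (Spec_execute data out) := by unfold Spec_execute; infer_instance

-- ===== CLAIM (what is proved, stated in full; the proofs are below) =====
def Claim_equal_execute : Prop := ∀ (data : List (List (String × Int))), Dom_execute data → Pre_execute data → Spec_execute data (execute data)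

-- ===== LEMMAS AND PROOFS =====

-- the common normal form both programs reach: every row annotated with the multiplicity of its block number
def pvRow (data : List (List (String × Int))) (t : List (String × Int)) : List (String × Int) :=
  ((PySem.Dict.mk t).insert "num_transactions" ((List.count (pvBn t) (data.map pvBn) : Int))).items

lemma execute_eq_map (data : List (List (String × Int))) :
    execute data = data.map (pvRow data) := by
  have hc : (data.foldl (fun d t => d.modify (pvBn t) 0 (fun x => x + 1)) (PySem.Dict.empty : PySem.Dict Int Int))
      = ((data.map pvBn).foldl (fun d x => d.modify x 0 (fun x => x + 1)) PySem.Dict.empty) := by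
    rw [List.foldl_map]
  unfold execute
  simp only [hc]
  simp only [PySem.Dict.getD_foldl_modify_add_one, PySem.Dict.getD_empty, zero_add]
  rw [PySem.List.foldl_append_singleton_eq_map]
  simp [pvRow]

-- A's counting fold and B's grouping fold, both rewritten as folds over (key, payload) pairs
lemma groupsB_pairs (data : List (List (String × Int))) :
    pvGroupsB data = (((PySem.List.enumerate data).map (fun p => (pvBn p.2, p.1))).foldl
      (fun d q => d.modify q.1 [] (fun xs => xs ++ [q.2])) PySem.Dict.empty) := by
  unfold pvGroupsB
  rw [List.foldl_map]

lemma keys_groupsB (data : List (List (String × Int))) :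
    (pvGroupsB data).keys = PySem.Set.ofList (data.map pvBn) := by
  rw [groupsB_pairs,
    PySem.Dict.keys_foldl_modify_key (((PySem.List.enumerate data).map (fun p => (pvBn p.2, p.1))))
      (fun q => q.1) [] (fun _ q xs => xs ++ [q.2]) PySem.Dict.empty]
  have : (((PySem.List.enumerate data).map (fun p => (pvBn p.2, p.1))).map (fun q => q.1))
      = data.map pvBn := by
    rw [List.map_map]
    calc (PySem.List.enumerate data).map ((fun q : Int × Int => q.1) ∘ (fun p : Int × (List (String × Int)) => (pvBn p.2, p.1)))
        = ((PySem.List.enumerate data).map (fun p => p.2)).map pvBn := by rw [List.map_map]; rfl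
      _ = data.map pvBn := by rw [PySem.List.map_snd_enumerate]
  rw [this]
  simp [PySem.Dict.keys_empty, PySem.Set.update_nil_left]

lemma nodup_keys_groupsB (data : List (List (String × Int))) :
    (pvGroupsB data).keys.Nodup := by
  rw [groupsB_pairs]
  exact PySem.Dict.nodup_keys_foldl_modify_key _ (fun q : Int × Int => q.1) []
    (fun _ q xs => xs ++ [q.2]) _ (by simp [PySem.Dict.keys_empty])

lemma groups_getD (data : List (List (String × Int))) (c : Int) :
    (pvGroupsB data).getD c [] =
      (((PySem.List.enumerate data).map (fun p => (pvBn p.2, p.1))).filter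
        (fun q => q.1 == c)).map (fun q => q.2) := by
  rw [groupsB_pairs, PySem.Dict.getD_foldl_modify_append]
  simp

lemma mem_enumerate {α : Type} (xs : List α) (s : Int) (p : Int × α) :
    p ∈ PySem.List.enumerate xs s ↔ ∃ k : Nat, k < xs.length ∧ p.1 = s + k ∧ xs[k]? = some p.2 := by
  induction xs generalizing s with
  | nil => simp [PySem.List.enumerate]
  | cons x xs ih =>
    rw [PySem.List.enumerate_cons]
    constructor
    · intro h
      rcases List.mem_cons.1 h with h | h
      · exact ⟨0, by simp, by simp [h], by simp [h]⟩
      · obtain ⟨k, hk, h1, h2⟩ := (ih (s+1)).1 h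
        exact ⟨k+1, by simpa using hk, by push_cast at h1 ⊢; omega, by simpa using h2⟩
    · rintro ⟨k, hk, h1, h2⟩
      cases k with
      | zero =>
        simp only [Nat.cast_zero, add_zero] at h1
        simp only [List.getElem?_cons_zero, Option.some.injEq] at h2
        exact List.mem_cons.2 (Or.inl (by cases p; simp_all))
      | succ k =>
        exact List.mem_cons.2 (Or.inr ((ih (s+1)).2
          ⟨k, by simpa using hk, by push_cast at h1 ⊢; omega, by simpa using h2⟩))

lemma mem_groups_getD (data : List (List (String × Int))) (c : Int) (i : Int) :
    i ∈ (pvGroupsB data).getD c [] ↔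
      ∃ k : Nat, k < data.length ∧ i = (k : Int) ∧ ∃ t, data[k]? = some t ∧ pvBn t = c := by
  rw [groups_getD]
  simp only [List.mem_map, List.mem_filter]
  constructor
  · rintro ⟨q, ⟨⟨p, hp, rfl⟩, hc⟩, rfl⟩
    obtain ⟨k, hk, h1, h2⟩ := (mem_enumerate data 0 p).1 hp
    exact ⟨k, hk, by simpa using h1, p.2, h2, by simpa using hc⟩
  · rintro ⟨k, hk, rfl, t, ht, rfl⟩
    exact ⟨(pvBn t, (k : Int)), ⟨⟨((k : Int), t), (mem_enumerate data 0 _).2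
      ⟨k, hk, by simp, by simpa using ht⟩, rfl⟩, by simp⟩, rfl⟩

lemma length_groups_getD (data : List (List (String × Int))) (c : Int) :
    ((pvGroupsB data).getD c []).length = List.count c (data.map pvBn) := by
  rw [groups_getD, List.length_map, ← List.countP_eq_length_filter]
  conv_rhs => rw [← PySem.List.map_snd_enumerate data 0]
  rw [List.count]
  simp only [List.countP_map]
  rfl


-- a fold of positional writes, characterised pointwise (last write wins; here all writes at j carry w j)
lemma foldl_pySetD_getElem? {α : Type} (L : List Int) (w : Int → α) (out : List α)
    (hL : ∀ i ∈ L, 0 ≤ i ∧ i < (out.length : Int)) :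
    (L.foldl (fun o i => PySem.List.pySetD o i (w i)) out).length = out.length ∧
    ∀ j : Nat, (L.foldl (fun o i => PySem.List.pySetD o i (w i)) out)[j]? =
      (if (j : Int) ∈ L then some (w j) else out[j]?) := by
  induction L generalizing out with
  | nil => simp
  | cons i L ih =>
    obtain ⟨h0, h1⟩ := hL i (List.mem_cons_self ..)
    have hset : PySem.List.pySetD out i (w i) = out.set i.toNat (w i) :=
      PySem.List.pySetD_of_nonneg out (w i) h0
    have hlen : (out.set i.toNat (w i)).length = out.length := List.length_set ..
    simp only [List.foldl_cons, hset]
    obtain ⟨ihl, ihg⟩ := ih (out.set i.toNat (w i))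
      (fun j hj => by rw [hlen]; exact hL j (List.mem_cons_of_mem _ hj))
    refine ⟨by rw [ihl, hlen], fun j => ?_⟩
    rw [ihg j, List.getElem?_set]
    by_cases hjL : (j : Int) ∈ L
    · simp [hjL]
    · by_cases hji : i.toNat = j
      · have : (j : Int) = i := by omega
        subst this
        simp [hjL, hji, List.mem_cons]
        omega
      · have : ¬ ((j : Int) = i) := by omega
        simp [hjL, hji, this, List.mem_cons]

lemma foldl_groups_getElem? {α : Type} (VL : List (List Int)) (v : Int → α) (W : List Int → Int → α)
    (out : List α)
    (h1 : ∀ L ∈ VL, ∀ i ∈ L, 0 ≤ i ∧ i < (out.length : Int))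
    (h2 : ∀ L ∈ VL, ∀ i ∈ L, W L i = v i) :
    (VL.foldl (fun o L => L.foldl (fun o i => PySem.List.pySetD o i (W L i)) o) out).length = out.length ∧
    ∀ j : Nat, (VL.foldl (fun o L => L.foldl (fun o i => PySem.List.pySetD o i (W L i)) o) out)[j]? =
      (if (∃ L ∈ VL, (j : Int) ∈ L) then some (v j) else out[j]?) := by
  induction VL generalizing out with
  | nil => simp
  | cons L VL ih =>
    obtain ⟨slen, sget⟩ := foldl_pySetD_getElem? L (W L) out (h1 L (List.mem_cons_self ..))
    obtain ⟨ihl, ihg⟩ := ih (L.foldl (fun o i => PySem.List.pySetD o i (W L i)) out)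
      (fun M hM i hi => by rw [slen]; exact h1 M (List.mem_cons_of_mem _ hM) i hi)
      (fun M hM i hi => h2 M (List.mem_cons_of_mem _ hM) i hi)
    simp only [List.foldl_cons]
    refine ⟨by rw [ihl, slen], fun j => ?_⟩
    rw [ihg j]
    by_cases hV : (∃ M ∈ VL, (j : Int) ∈ M)
    · simp [hV]
    · rw [sget j]
      by_cases hjL : (j : Int) ∈ L
      · simp [hV, hjL, h2 L (List.mem_cons_self ..) _ hjL]
      · simp [hV, hjL]

lemma values_groupsB_mem {data : List (List (String × Int))} {L : List Int}
    (h : L ∈ (pvGroupsB data).values) : ∃ c, L = (pvGroupsB data).getD c [] := by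
  rw [PySem.Dict.values_eq_map_keys _ (nodup_keys_groupsB data) []] at h
  obtain ⟨c, _, rfl⟩ := List.mem_map.1 h
  exact ⟨c, rfl⟩

lemma execute_alt_eq_map (data : List (List (String × Int))) :
    execute_alt data = data.map (pvRow data) := by
  have hW : ∀ L ∈ (pvGroupsB data).values, ∀ i ∈ L,
      (((PySem.Dict.mk (PySem.List.pyGetD data i [])).insert "num_transactions"
          ((L.length : Int))).items) = pvRow data (PySem.List.pyGetD data i []) := by
    intro L hL i hi
    obtain ⟨c, rfl⟩ := values_groupsB_mem hL
    obtain ⟨k, hk, rfl, t, ht, rfl⟩ := (mem_groups_getD data c i).1 hi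
    have hget : PySem.List.pyGetD data (k : Int) [] = t := by
      rw [PySem.List.pyGetD_natCast, List.getD]
      simp only [List.getElem?_eq_getElem hk, Option.some.injEq] at ht
      simp [List.getElem?_eq_getElem hk, ht]
    rw [hget, length_groups_getD, pvRow]
  have hbound : ∀ L ∈ (pvGroupsB data).values, ∀ i ∈ L,
      0 ≤ i ∧ i < ((List.replicate data.length ([] : List (String × Int))).length : Int) := by
    intro L hL i hi
    obtain ⟨c, rfl⟩ := values_groupsB_mem hL
    obtain ⟨k, hk, rfl, t, ht, rfl⟩ := (mem_groups_getD data c i).1 hi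
    simp only [List.length_replicate]
    exact ⟨by positivity, by exact_mod_cast hk⟩
  obtain ⟨hlen, hget⟩ := foldl_groups_getElem? (pvGroupsB data).values
    (fun i => pvRow data (PySem.List.pyGetD data i []))
    (fun L i => (((PySem.Dict.mk (PySem.List.pyGetD data i [])).insert "num_transactions"
        ((L.length : Int))).items))
    (List.replicate data.length []) hbound hW
  unfold execute_alt
  apply List.ext_getElem?
  intro j
  rw [hget j]
  by_cases hj : j < data.length
  · have hcov : ∃ L ∈ (pvGroupsB data).values, (j : Int) ∈ L := by
      refine ⟨(pvGroupsB data).getD (pvBn data[j]) [], ?_, ?_⟩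
      · rw [PySem.Dict.values_eq_map_keys _ (nodup_keys_groupsB data) []]
        refine List.mem_map.2 ⟨pvBn data[j], ?_, rfl⟩
        rw [keys_groupsB, PySem.Set.mem_ofList]
        exact List.mem_map.2 ⟨data[j], List.getElem_mem hj, rfl⟩
      · exact (mem_groups_getD data _ _).2 ⟨j, hj, rfl, data[j], List.getElem?_eq_getElem hj, rfl⟩
    rw [if_pos hcov, List.getElem?_map, List.getElem?_eq_getElem hj]
    simp only [Option.map_some]
    congr 1
    rw [PySem.List.pyGetD_natCast, List.getD, List.getElem?_eq_getElem hj]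
    rfl
  · have hncov : ¬ ∃ L ∈ (pvGroupsB data).values, (j : Int) ∈ L := by
      rintro ⟨L, hL, hjL⟩
      obtain ⟨c, rfl⟩ := values_groupsB_mem hL
      obtain ⟨k, hk, hkj, -⟩ := (mem_groups_getD data c _).1 hjL
      have : j = k := by exact_mod_cast hkj
      omega
    rw [if_neg hncov]
    have hj' : data.length ≤ j := Nat.le_of_not_lt hj
    simp [hj']

-- ===== VERDICT (by name: the statement is the Claim_ definition above) =====
theorem execute_spec : Claim_equal_execute := by
  intro data _ _
  unfold Spec_execute
  rw [execute_eq_map, execute_alt_eq_map]
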